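-- pv_equiv track=rewrite | github.com/wwlee94/everyday-algorithm | python/algorithm-test/위메프/위메프-DFS.py | solution
-- ===== SOURCE A (Python) =====
-- def solution(N, M, map):
--
--     visited = [[0]*M for _ in range(N) ]
--
--     def dfs(i, j, path):
--         if i >= N or j >= M :
--             return
--         if visited[i][j] == 0:
--             path.append(map[i][j])
--             visited[i][j] = 1
--             dfs(i+1, j, path)
--             dfs(i, j+1, path)
--         return path
--
--     answer = dfs(0,0, [])
--     return answer
-- ===== SOURCE B (Python) =====
-- def solution(N, M, map):
--     # The DFS of A (down before right, skip visited) always produces the same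
--     # deterministic order: the first column top-down, then rows bottom-up,
--     # each from column 1 onward.  Compute it directly, no visited matrix.
--     if N <= 0 or M <= 0:
--         return None
--     col = [map[i][0] for i in range(N)]
--     rest = [map[i][j] for i in reversed(range(N)) for j in range(1, M)]
--     return col + rest
-- ===== Notes on version B (the rewrite author's own statement) =====
-- stated objective: alternative
-- what changed: Replaces the recursive DFS with visited matrix by a direct closed-form construction of the (deterministic) traversal order: first column top-down, then rows bottom-up from column 1.
import Mathlib
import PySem

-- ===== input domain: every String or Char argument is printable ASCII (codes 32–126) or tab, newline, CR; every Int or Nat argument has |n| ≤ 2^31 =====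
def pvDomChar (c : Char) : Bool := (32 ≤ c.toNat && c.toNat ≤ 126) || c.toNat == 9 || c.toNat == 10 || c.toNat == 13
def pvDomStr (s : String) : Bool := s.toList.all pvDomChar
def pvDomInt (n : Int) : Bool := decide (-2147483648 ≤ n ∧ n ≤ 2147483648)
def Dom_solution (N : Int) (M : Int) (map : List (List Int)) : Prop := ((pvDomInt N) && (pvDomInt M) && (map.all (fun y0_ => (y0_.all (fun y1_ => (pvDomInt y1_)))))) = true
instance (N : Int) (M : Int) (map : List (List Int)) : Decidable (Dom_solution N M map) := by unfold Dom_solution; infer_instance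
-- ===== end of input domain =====

-- B replaces A's recursive DFS (visited matrix, down-then-right recursion) by the
-- closed-form traversal order it always produces: first column top-down, then rows
-- bottom-up from column 1.  (A mutates nothing observable; equivalence is about the
-- return value.)

-- ===== PORT A =====
-- xs[i][j] for the always-nonnegative, in-range-under-Pre_ indices A uses
def pvCell (xs : List (List Int)) (i j : Int) : Int :=
  PySem.List.pyGetD (PySem.List.pyGetD xs i []) j 0

-- visited[i][j] = v ; i, j are always ≥ 0 and in range here, where this is exact
def pvSet2 (V : List (List Int)) (i j : Int) (v : Int) : List (List Int) :=
  V.set i.toNat ((PySem.List.pyGetD V i []).set j.toNat v)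

-- the inner recursive dfs; fuel is a totality guard only (recursion depth ≤ N+M),
-- the in-place (visited, path) state is threaded explicitly
def dfsA (N M : Int) (map : List (List Int)) :
    Nat → Int → Int → List (List Int) → List Int → List (List Int) × List Int
  | 0, _, _, V, p => (V, p)
  | fuel+1, i, j, V, p =>
    if N ≤ i ∨ M ≤ j then (V, p)
    else if pvCell V i j = 0 then
      let s2 := dfsA N M map fuel (i+1) j (pvSet2 V i j 1) (p ++ [pvCell map i j])
      dfsA N M map fuel i (j+1) s2.1 s2.2
    else (V, p)

def solution (N : Int) (M : Int) (map : List (List Int)) : Option (List Int) :=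
  let visited := List.replicate N.toNat (List.replicate M.toNat (0 : Int))
  -- Python's dfs(0,0,[]) returns None exactly when 0 >= N or 0 >= M,
  -- and otherwise the (mutated) path list
  if N ≤ 0 ∨ M ≤ 0 then none
  else some (dfsA N M map (N.toNat + M.toNat + 1) 0 0 visited []).2

-- ===== PORT B =====
def solution_alt (N : Int) (M : Int) (map : List (List Int)) : Option (List Int) :=
  if N ≤ 0 ∨ M ≤ 0 then none
  else
    let col := (PySem.List.pyRange 0 N 1).map (fun i => pvCell map i 0)
    let rest := (PySem.List.pyRange 0 N 1).reverse.flatMap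
      (fun i => (PySem.List.pyRange 1 M 1).map (fun j => pvCell map i j))
    some (col ++ rest)

-- ===== PRECONDITION & SPEC =====
-- Pre_ excludes exactly the inputs on which Python A raises IndexError:
-- N > 0 and M > 0 but map has fewer than N rows or some of its first N rows
-- has fewer than M entries (B raises there too).
def Pre_solution (N : Int) (M : Int) (map : List (List Int)) : Prop :=
  N ≤ 0 ∨ M ≤ 0 ∨ (N ≤ (map.length : Int) ∧ ∀ row ∈ map.take N.toNat, M ≤ (row.length : Int))
instance (N : Int) (M : Int) (map : List (List Int)) : Decidable (Pre_solution N M map) := by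
  unfold Pre_solution; infer_instance

def pvWitness_solution : Int × Int × List (List Int) := (2, 2, [[1, 2], [3, 4]])

def Spec_solution (N : Int) (M : Int) (map : List (List Int)) (out : Option (List Int)) : Prop :=
  out = solution_alt N M map
instance (N : Int) (M : Int) (map : List (List Int)) (out : Option (List Int)) :
    Decidable (Spec_solution N M map out) := by unfold Spec_solution; infer_instance

-- ===== CLAIM (what is proved, stated in full; the proofs are below) =====
def Claim_equal_solution : Prop := ∀ (N : Int) (M : Int) (map : List (List Int)),
  Dom_solution N M map → Pre_solution N M map → Spec_solution N M map (solution N M map)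

-- ===== LEMMAS AND PROOFS =====

-- Nat-indexed cell access
def cellN (xs : List (List Int)) (i j : Nat) : Int := (xs.getD i []).getD j 0

theorem pvCell_natCast (xs : List (List Int)) (i j : Nat) :
    pvCell xs (i : Int) (j : Int) = cellN xs i j := by
  simp [pvCell, cellN, PySem.List.pyGetD_natCast]

def Shape (V : List (List Int)) (n m : Nat) : Prop :=
  V.length = n ∧ ∀ r, r < n → (V.getD r []).length = m

-- the segment of row i from column c, k entries
def rowSeg (map : List (List Int)) (i c k : Nat) : List Int :=
  (List.range k).map (fun d => cellN map i (c + d))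

-- output of dfs(i, 0) on the invariant states: k = n - i rows remain
def outFrom (map : List (List Int)) (m : Nat) : Nat → Nat → List Int
  | _, 0 => []
  | i, k+1 => cellN map i 0 :: (outFrom map m (i+1) k ++ rowSeg map i 1 (m - 1))

theorem pvSet2_natCast (V : List (List Int)) (i j : Nat) (v : Int) :
    pvSet2 V (i : Int) (j : Int) v = V.set i ((V.getD i []).set j v) := by
  simp [pvSet2, PySem.List.pyGetD_natCast]

theorem shape_pvSet2 (V : List (List Int)) (n m i j : Nat) (v : Int)
    (hS : Shape V n m) : Shape (pvSet2 V (i : Int) (j : Int) v) n m := by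
  obtain ⟨h1, h2⟩ := hS
  rw [pvSet2_natCast]
  refine ⟨by simp [h1], fun r hr => ?_⟩
  by_cases hri : r = i
  · subst hri
    have hlen : r < V.length := by omega
    rw [List.getD_eq_getElem?_getD, List.getElem?_set_self hlen]
    simp only [Option.getD_some, List.length_set]
    exact h2 r hr
  · rw [List.getD_eq_getElem?_getD, List.getElem?_set_ne (by omega), ← List.getD_eq_getElem?_getD]
    exact h2 r hr

theorem cellN_pvSet2 (V : List (List Int)) (n m i j : Nat) (v : Int)
    (hS : Shape V n m) (hi : i < n) (hj : j < m) (r c : Nat) :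
    cellN (pvSet2 V (i : Int) (j : Int) v) r c =
      if r = i ∧ c = j then v else cellN V r c := by
  obtain ⟨h1, h2⟩ := hS
  rw [pvSet2_natCast]
  have hiV : i < V.length := by omega
  by_cases hri : r = i
  · subst hri
    have hrow : (V.set r ((V.getD r []).set j v)).getD r [] = (V.getD r []).set j v := by
      simp [List.getD_eq_getElem?_getD, List.getElem?_set_self hiV]
    rw [cellN, hrow]
    have hjrow : j < (V.getD r []).length := by rw [h2 r hi]; exact hj
    by_cases hcj : c = j
    · subst hcj
      rw [List.getD_eq_getElem?_getD, List.getElem?_set_self hjrow]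
      simp
    · rw [List.getD_eq_getElem?_getD, List.getElem?_set_ne (fun h => hcj h.symm),
        ← List.getD_eq_getElem?_getD]
      simp [cellN, hcj]
  · simp only [cellN, List.getD_eq_getElem?_getD, List.getElem?_set_ne (fun h => hri h.symm)]
    simp [hri]

theorem rowSeg_succ (map : List (List Int)) (i c k : Nat) :
    rowSeg map i c (k + 1) = cellN map i c :: rowSeg map i (c + 1) k := by
  simp only [rowSeg, List.range_succ_eq_map, List.map_cons, List.map_map, Nat.add_zero]
  congr 1
  apply List.map_congr_left
  intro d _
  simp only [Function.comp_apply]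
  congr 1
  omega

-- the inner row run of A's dfs: dfs(i, c) when row i+1 (below) is visited/out of
-- range and row i from column c on is unvisited appends exactly row i's cells c..m-1
theorem dfs_row (N M : Int) (map : List (List Int)) (n m : Nat) (hN : N = (n : Int))
    (hM : M = (m : Int)) (i : Nat) (hi : i < n) :
    ∀ (k c fuel : Nat) (V : List (List Int)) (p : List Int),
      m = c + k → k + 1 ≤ fuel → Shape V n m →
      (∀ d, d < k → cellN V i (c + d) = 0) →
      (∀ d, d < k → (n ≤ i + 1 ∨ cellN V (i + 1) (c + d) ≠ 0)) →
      ∃ V', dfsA N M map fuel (i : Int) (c : Int) V p = (V', p ++ rowSeg map i c k) ∧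
        Shape V' n m ∧
        ∀ r c', cellN V' r c' =
          if r = i ∧ c ≤ c' ∧ c' < c + k then 1 else cellN V r c' := by
  subst hN hM
  intro k
  induction k with
  | zero =>
    intro c fuel V p hm hfuel hS _ _
    cases fuel with
    | zero => omega
    | succ f =>
      refine ⟨V, ?_, hS, ?_⟩
      · simp only [dfsA, rowSeg]
        rw [if_pos (by omega)]
        simp
      · intro r c'
        rw [if_neg (by omega)]
  | succ k ih =>
    intro c fuel V p hm hfuel hS hrow hdown
    cases fuel with
    | zero => omega
    | succ f =>
      have hc : c < m := by omega
      have hcell : cellN V i c = 0 := by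
        have := hrow 0 (by omega); simpa using this
      -- unfold the call dfs(i, c): in range, unvisited
      rw [dfsA]
      rw [if_neg (by omega), pvCell_natCast, if_pos hcell]
      set V1 := pvSet2 V (i : Int) (c : Int) 1 with hV1
      set p1 := p ++ [pvCell map (i : Int) (c : Int)] with hp1
      have hSV1 : Shape V1 n m := shape_pvSet2 V n m i c 1 hS
      have hcellV1 : ∀ r c', cellN V1 r c' = if r = i ∧ c' = c then 1 else cellN V r c' :=
        cellN_pvSet2 V n m i c 1 hS hi hc
      -- the down call dfs(i+1, c) returns its state unchanged
      have hfpos : ∃ f', f = f' + 1 := ⟨f - 1, by omega⟩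
      obtain ⟨f', rfl⟩ := hfpos
      have hdownstep :
          dfsA (n : Int) (m : Int) map (f' + 1) ((i : Int) + 1) (c : Int) V1 p1 = (V1, p1) := by
        rw [dfsA]
        by_cases hout : (n : Int) ≤ (i : Int) + 1 ∨ (m : Int) ≤ (c : Int)
        · rw [if_pos hout]
        · rw [if_neg hout]
          have hvis : cellN V (i + 1) c ≠ 0 := by
            rcases hdown 0 (by omega) with h | h
            · exact absurd h (by omega)
            · simpa using h
          have : pvCell V1 ((i : Int) + 1) (c : Int) = cellN V1 (i + 1) c := by
            have := pvCell_natCast V1 (i + 1) c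
            push_cast at this
            exact this
          rw [this, if_neg]
          rw [hcellV1]
          rw [if_neg (by omega)]
          exact hvis
      rw [hdownstep]
      -- the right call dfs(i, c+1) continues the row: induction hypothesis
      have harg : (c : Int) + 1 = ((c + 1 : Nat) : Int) := by push_cast; ring
      rw [harg]
      obtain ⟨V', heq, hSV', hchar⟩ :=
        ih (c + 1) (f' + 1) V1 p1 (by omega) (by omega) hSV1
          (fun d hd => by
            rw [hcellV1, if_neg (by omega)]
            have := hrow (d + 1) (by omega)
            have harg2 : c + 1 + d = c + (d + 1) := by omega
            rw [harg2]; exact this)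
          (fun d hd => by
            rcases hdown (d + 1) (by omega) with h | h
            · exact Or.inl h
            · refine Or.inr ?_
              rw [hcellV1, if_neg (by omega)]
              have harg2 : c + 1 + d = c + (d + 1) := by omega
              rw [harg2]; exact h)
      refine ⟨V', ?_, hSV', ?_⟩
      · rw [heq, hp1, rowSeg_succ, pvCell_natCast]
        simp
      · intro r c'
        rw [hchar, hcellV1]
        split_ifs <;> first | rfl | omega

-- the column spine of A's dfs: dfs(i, 0) with column 0 above row i visited and
-- everything from row i down unvisited visits all remaining rows in the fixed order
theorem dfs_col (N M : Int) (map : List (List Int)) (n m : Nat) (hN : N = (n : Int))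
    (hM : M = (m : Int)) (hm : 0 < m) :
    ∀ (k i fuel : Nat) (V : List (List Int)) (p : List Int),
      n = i + k → k + m + 1 ≤ fuel → Shape V n m →
      (∀ r c, r < n → c < m → cellN V r c = if r < i ∧ c = 0 then 1 else 0) →
      ∃ V', dfsA N M map fuel (i : Int) 0 V p = (V', p ++ outFrom map m i k) ∧
        Shape V' n m ∧
        ∀ r c, r < n → c < m → cellN V' r c = if r < i ∧ 0 < c then 0 else 1 := by
  subst hN hM
  intro k
  induction k with
  | zero =>
    intro i fuel V p hn hfuel hS hchar
    cases fuel with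
    | zero => omega
    | succ f =>
      refine ⟨V, ?_, hS, ?_⟩
      · rw [dfsA, if_pos (by omega)]
        simp [outFrom]
      · intro r c hr hc
        rw [hchar r c hr hc]
        split_ifs <;> omega
  | succ k ih =>
    intro i fuel V p hn hfuel hS hchar
    cases fuel with
    | zero => omega
    | succ f =>
      have hi : i < n := by omega
      rw [dfsA, if_neg (by omega)]
      have hcast0 : ((0 : Nat) : Int) = (0 : Int) := by norm_num
      have hcell : pvCell V (i : Int) 0 = cellN V i 0 := by
        have := pvCell_natCast V i 0; rwa [hcast0] at this
      have hbranch : cellN V i 0 = 0 := by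
        rw [hchar i 0 hi hm, if_neg (by omega)]
      rw [hcell, hbranch, if_pos rfl]
      have hSV1 : Shape (pvSet2 V (i : Int) 0 1) n m := by
        have := shape_pvSet2 V n m i 0 1 hS; rwa [hcast0] at this
      have hcellV1 : ∀ r c, cellN (pvSet2 V (i : Int) 0 1) r c =
          if r = i ∧ c = 0 then 1 else cellN V r c := by
        have := cellN_pvSet2 V n m i 0 1 hS hi hm; rwa [hcast0] at this
      set V1 := pvSet2 V (i : Int) 0 1 with hV1
      set p1 := p ++ [pvCell map (i : Int) 0] with hp1
      -- down call dfs(i+1, 0): the smaller column problem (IH)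
      have harg : (i : Int) + 1 = ((i + 1 : Nat) : Int) := by push_cast; ring
      rw [harg]
      obtain ⟨V2, heq2, hSV2, hchar2⟩ :=
        ih (i + 1) f V1 p1 (by omega) (by omega) hSV1
          (fun r c hr hc => by
            rw [hcellV1 r c, hchar r c hr hc]
            split_ifs <;> omega)
      rw [heq2]
      -- right call dfs(i, 1): the row run of row i (row lemma)
      have harg1 : (0 : Int) + 1 = ((1 : Nat) : Int) := by norm_num
      rw [harg1]
      obtain ⟨V3, heq3, hSV3, hchar3⟩ :=
        dfs_row (n : Int) (m : Int) map n m rfl rfl i hi (m - 1) 1 f V2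
          (p1 ++ outFrom map m (i + 1) k) (by omega) (by omega) hSV2
          (fun d hd => by
            rw [hchar2 i (1 + d) hi (by omega), if_pos (by omega)])
          (fun d hd => by
            by_cases h : i + 1 < n
            · refine Or.inr ?_
              rw [hchar2 (i + 1) (1 + d) h (by omega), if_neg (by omega)]
              norm_num
            · exact Or.inl (by omega))
      rw [heq3]
      refine ⟨V3, ?_, hSV3, ?_⟩
      · have hout : outFrom map m i (k + 1) =
            cellN map i 0 :: (outFrom map m (i + 1) k ++ rowSeg map i 1 (m - 1)) := rfl
        rw [hout, hp1]
        have hcm : pvCell map (i : Int) 0 = cellN map i 0 := by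
          have := pvCell_natCast map i 0; rwa [hcast0] at this
        rw [hcm]
        simp
      · intro r c hr hc
        rw [hchar3 r c]
        by_cases h : r = i ∧ 1 ≤ c ∧ c < 1 + (m - 1)
        · rw [if_pos h, if_neg (by omega)]
        · rw [if_neg h, hchar2 r c hr hc]
          split_ifs <;> omega

-- dfs's output in closed form: column 0 top-down, then rows bottom-up from column 1
theorem outFrom_eq (map : List (List Int)) (m : Nat) :
    ∀ (k i : Nat), outFrom map m i k =
      (List.range k).map (fun d => cellN map (i + d) 0) ++
      ((List.range k).reverse.map (fun d => rowSeg map (i + d) 1 (m - 1))).flatten := by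
  intro k
  induction k with
  | zero => intro i; simp [outFrom]
  | succ k ih =>
    intro i
    have hcol : (List.range (k + 1)).map (fun d => cellN map (i + d) 0) =
        cellN map i 0 :: (List.range k).map (fun d => cellN map (i + 1 + d) 0) := by
      rw [List.range_succ_eq_map, List.map_cons, List.map_map]
      refine congrArg₂ _ (by simp) ?_
      apply List.map_congr_left
      intro d _
      simp only [Function.comp_apply]
      congr 1
      omega
    have hflat : ((List.range (k + 1)).reverse.map
          (fun d => rowSeg map (i + d) 1 (m - 1))).flatten =
        ((List.range k).reverse.map (fun d => rowSeg map (i + 1 + d) 1 (m - 1))).flatten ++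
          rowSeg map i 1 (m - 1) := by
      have h1 : (List.map Nat.succ (List.range k)).reverse =
          List.map Nat.succ (List.range k).reverse := List.map_reverse.symm
      rw [List.range_succ_eq_map, List.reverse_cons, List.map_append, List.flatten_append,
        h1, List.map_map]
      refine congrArg₂ _ (congrArg _ (List.map_congr_left ?_)) (by simp)
      intro d _
      simp only [Function.comp_apply]
      congr 1
      omega
    show cellN map i 0 :: (outFrom map m (i + 1) k ++ rowSeg map i 1 (m - 1)) = _
    rw [ih (i + 1), hcol, hflat]
    simp [List.append_assoc]

-- ===== VERDICT (by name: the statement is the Claim_ definition above) =====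
theorem solution_spec : Claim_equal_solution := by
  intro N M map _ hpre
  unfold Spec_solution
  by_cases hNM : N ≤ 0 ∨ M ≤ 0
  · simp [solution, solution_alt, hNM]
  · have hN0 : 0 < N := by omega
    have hM0 : 0 < M := by omega
    set n := N.toNat with hn
    set m := M.toNat with hm
    have hN : N = (n : Int) := by omega
    have hM : M = (m : Int) := by omega
    have hnpos : 0 < n := by omega
    have hmpos : 0 < m := by omega
    -- A's side: apply the column lemma from the fresh state
    have hShape0 : Shape (List.replicate n (List.replicate m (0 : Int))) n m := by
      constructor
      · simp
      · intro r hr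
        rw [List.getD_eq_getElem?_getD, List.getElem?_replicate]
        simp [hr]
    have hchar0 : ∀ r c, r < n → c < m →
        cellN (List.replicate n (List.replicate m (0 : Int))) r c =
          if r < 0 ∧ c = 0 then 1 else 0 := by
      intro r c hr hc
      rw [if_neg (by omega)]
      simp [cellN, List.getD_eq_getElem?_getD, hr, hc]
    obtain ⟨V', heq, _, _⟩ :=
      dfs_col N M map n m hN hM hmpos n 0 (n + m + 1)
        (List.replicate n (List.replicate m (0 : Int))) [] (by omega) (by omega)
        hShape0 hchar0
    have hA : solution N M map = some (outFrom map m 0 n) := by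
      unfold solution
      rw [if_neg (by omega)]
      rw [show ((0 : Nat) : Int) = (0 : Int) from rfl] at heq
      rw [← hn, ← hm, heq]
      simp
    -- B's side: the comprehensions are the closed form of outFrom
    have hB : solution_alt N M map =
        some ((List.range n).map (fun d => cellN map d 0) ++
          ((List.range n).reverse.map (fun d => rowSeg map d 1 (m - 1))).flatten) := by
      unfold solution_alt
      rw [if_neg (by omega)]
      show some ((PySem.List.pyRange 0 N 1).map (fun i => pvCell map i 0) ++
          (PySem.List.pyRange 0 N 1).reverse.flatMap
            (fun i => (PySem.List.pyRange 1 M 1).map (fun j => pvCell map i j))) = _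
      have hr1 : PySem.List.pyRange 0 N 1 = List.map (Nat.cast : Nat → Int) (List.range n) := by
        rw [hN, PySem.List.pyRange_one]
        have h0 : ((n : Int) - 0).toNat = n := by omega
        rw [h0]
        apply List.map_congr_left
        intro d _
        omega
      have hr2 : PySem.List.pyRange 1 M 1 =
          List.map (fun d : Nat => ((1 + d : Nat) : Int)) (List.range (m - 1)) := by
        rw [hM, PySem.List.pyRange_one]
        have h0 : ((m : Int) - 1).toNat = m - 1 := by omega
        rw [h0]
        apply List.map_congr_left
        intro d _
        push_cast
        ring
      rw [hr1, hr2]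
      congr 1
      congr 1
      · rw [List.map_map]
        apply List.map_congr_left
        intro d _
        simp only [Function.comp_apply]
        have := pvCell_natCast map d 0
        rwa [show ((0 : Nat) : Int) = (0 : Int) from rfl] at this
      · have hrev : (List.map (Nat.cast : Nat → Int) (List.range n)).reverse =
            List.map (Nat.cast : Nat → Int) (List.range n).reverse := List.map_reverse.symm
        rw [hrev, List.flatMap_map, List.flatMap_def]
        congr 1
        apply List.map_congr_left
        intro d _
        rw [List.map_map]
        unfold rowSeg
        apply List.map_congr_left
        intro e _
        simp only [Function.comp_apply]
        have := pvCell_natCast map d (1 + e)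
        rw [this]
    rw [hA, hB, outFrom_eq]
    simp
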